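-- pv_equiv track=rewrite | github.com/Gucchi0512/EnglishRepository | be_verb.py | CheckBeCentence
-- ===== SOURCE A (Python) =====
-- def CheckBeCentence(pos, index):
--     count=0
--     label=''
--     for data in pos:
--         count+=1
--         tag = data[1]
--         if count-1<index:
--             continue
--         if tag == 'RB':
--             label+='Negative'
--         elif tag == 'VBG':
--             label+='Progressive'
--             break
--         elif tag == 'VBN':
--             label+=('Passive'+CheckBeCentence(pos, count))
--             break
--         elif tag[0]!='V':
--             label+='Simple'
--             break
--     return label
-- ===== SOURCE B (Python) =====
-- def CheckBeCentence(pos, index):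
--     # Iterative flattening of A's VBN tail recursion: one index loop, no restart.
--     label = ''
--     i = max(index, 0)
--     while i < len(pos):
--         tag = pos[i][1]
--         i += 1
--         if tag == 'RB':
--             label += 'Negative'
--         elif tag == 'VBG':
--             label += 'Progressive'
--             break
--         elif tag == 'VBN':
--             label += 'Passive'
--         elif not tag.startswith('V'):
--             label += 'Simple'
--             break
--     return label
-- ===== Notes on version B (the rewrite author's own statement) =====
-- stated objective: simpler
-- what changed: Replaces A's count-based skip plus tail recursion on VBN (which restarts the whole scan with a new index) by a single iterative index loop starting at max(index,0) where VBN just continues the loop.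
-- outside the precondition, e.g. on CheckBeCentence([('a', 'VBG'), ('b', '')], 0): A returns 'Progressive', B returns 'Progressive'
import Mathlib
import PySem

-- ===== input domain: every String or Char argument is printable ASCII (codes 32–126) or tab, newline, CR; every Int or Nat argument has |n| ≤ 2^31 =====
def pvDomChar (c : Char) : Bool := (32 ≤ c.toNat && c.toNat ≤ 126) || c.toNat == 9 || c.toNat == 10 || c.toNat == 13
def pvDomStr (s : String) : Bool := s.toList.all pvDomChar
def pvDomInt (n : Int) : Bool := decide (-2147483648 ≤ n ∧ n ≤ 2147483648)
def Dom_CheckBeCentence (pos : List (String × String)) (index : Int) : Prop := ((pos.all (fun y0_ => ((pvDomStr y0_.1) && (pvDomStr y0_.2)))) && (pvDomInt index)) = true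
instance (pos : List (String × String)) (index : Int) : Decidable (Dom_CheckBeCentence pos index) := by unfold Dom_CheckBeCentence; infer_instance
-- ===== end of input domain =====

-- B flattens A's VBN tail recursion into one iterative index loop (objective: simpler).

-- ===== PORT A =====
-- A's for-loop: state (count, label); `.inl s` = return s (end of list / break),
-- `.inr (s, c)` = the VBN break, requesting `s ++ CheckBeCentence pos c`.
def loopA : List (String × String) → Int → Int → String → (String ⊕ (String × Int))
  | [], _, _, label => .inl label
  | d :: rest, index, count, label =>
    let count := count + 1
    let tag := d.2
    if count - 1 < index then loopA rest index count label
    else if tag == "RB" then loopA rest index count (label ++ "Negative")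
    else if tag == "VBG" then .inl (label ++ "Progressive")
    else if tag == "VBN" then .inr (label ++ "Passive", count)
    else if PySem.Str.pyGet? tag 0 ≠ some 'V' then .inl (label ++ "Simple")
    else loopA rest index count label

-- A's self-recursion on 'VBN' (index strictly increases and is ≤ len(pos), so the
-- recursion depth is at most pos.length + 1); gas is only a totality guard, it never
-- runs out on the start value pos.length + 1 (proved in goA_irrel / the claim's proof).
def goA (pos : List (String × String)) : Nat → Int → String
  | 0, _ => ""
  | gas + 1, index =>
    match loopA pos index 0 "" with
    | .inl s => s
    | .inr (s, c) => s ++ goA pos gas c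

def CheckBeCentence (pos : List (String × String)) (index : Int) : String :=
  goA pos (pos.length + 1) index

-- ===== PORT B =====
-- B's while loop over the index i; fuel = remaining bound pos.length - i is only a
-- totality guard (it never runs out when started at pos.length).
def loopB (pos : List (String × String)) : Nat → Nat → String → String
  | 0, _, label => label
  | fuel + 1, i, label =>
    if h : i < pos.length then
      -- tag = pos[i][1]
      if (pos[i]).2 == "RB" then loopB pos fuel (i + 1) (label ++ "Negative")
      else if (pos[i]).2 == "VBG" then label ++ "Progressive"
      else if (pos[i]).2 == "VBN" then loopB pos fuel (i + 1) (label ++ "Passive")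
      else if ¬ PySem.Str.startswith (pos[i]).2 "V" then label ++ "Simple"
      else loopB pos fuel (i + 1) label
    else label

def CheckBeCentence_alt (pos : List (String × String)) (index : Int) : String :=
  loopB pos pos.length (max index 0).toNat ""

-- ===== PRECONDITION & SPEC =====
-- Pre_ excludes any pos containing an empty tag, because A raises IndexError at `tag[0]`
-- when the scan reaches such a tag; where an empty tag is skipped or lies after a break,
-- A still returns and B agrees, so Pre_ is slightly narrower than A's raising set.
def Pre_CheckBeCentence (pos : List (String × String)) (index : Int) : Prop :=
  ∀ p ∈ pos, p.2 ≠ ""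
instance (pos : List (String × String)) (index : Int) : Decidable (Pre_CheckBeCentence pos index) := by
  unfold Pre_CheckBeCentence; infer_instance

def pvWitness_CheckBeCentence : (List (String × String)) × Int :=
  ([("is", "VBZ"), ("not", "RB"), ("being", "VBG")], 0)

def Spec_CheckBeCentence (pos : List (String × String)) (index : Int) (out : String) : Prop := out = CheckBeCentence_alt pos index
instance (pos : List (String × String)) (index : Int) (out : String) : Decidable (Spec_CheckBeCentence pos index out) := by unfold Spec_CheckBeCentence; infer_instance

-- ===== CLAIM (what is proved, stated in full; the proofs are below) =====
def Claim_equal_CheckBeCentence : Prop := ∀ (pos : List (String × String)) (index : Int), Dom_CheckBeCentence pos index → Pre_CheckBeCentence pos index → Spec_CheckBeCentence pos index (CheckBeCentence pos index)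

-- ===== LEMMAS AND PROOFS =====

theorem loopA_inr {rest : List (String × String)} {index count c : Int} {label s : String}
    (h : loopA rest index count label = .inr (s, c)) :
    index < c ∧ count < c ∧ c ≤ count + rest.length := by
  induction rest generalizing count label with
  | nil => simp [loopA] at h
  | cons d rest ih =>
    simp only [loopA] at h
    split_ifs at h with h1 h2 h3 h4 h5
    · have := ih h; simp only [List.length_cons]; push_cast; omega
    · have := ih h; simp only [List.length_cons]; push_cast; omega
    · obtain ⟨-, hc⟩ := h
      simp only [List.length_cons]; push_cast; omega
    · have := ih h; simp only [List.length_cons]; push_cast; omega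

-- goA does not depend on its gas once the gas exceeds the remaining recursion depth
theorem goA_irrel (pos : List (String × String)) (d : Nat) :
    ∀ (g1 g2 : Nat) (c : Int), 1 ≤ c →
      pos.length - c.toNat ≤ d → pos.length - c.toNat < g1 → pos.length - c.toNat < g2 →
      goA pos g1 c = goA pos g2 c := by
  induction d with
  | zero =>
    intro g1 g2 c hc hd h1 h2
    obtain ⟨g1, rfl⟩ : ∃ g, g1 = g + 1 := ⟨g1 - 1, by omega⟩
    obtain ⟨g2, rfl⟩ : ∃ g, g2 = g + 1 := ⟨g2 - 1, by omega⟩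
    rcases h : loopA pos c 0 "" with s | ⟨s, c'⟩
    · simp only [goA, h]
    · have := loopA_inr h
      omega
  | succ d ih =>
    intro g1 g2 c hc hd h1 h2
    obtain ⟨g1, rfl⟩ : ∃ g, g1 = g + 1 := ⟨g1 - 1, by omega⟩
    obtain ⟨g2, rfl⟩ : ∃ g, g2 = g + 1 := ⟨g2 - 1, by omega⟩
    rcases h : loopA pos c 0 "" with s | ⟨s, c'⟩
    · simp only [goA, h]
    · have hi := loopA_inr h
      simp only [goA, h]
      rw [ih g1 g2 c' (by omega) (by omega) (by omega) (by omega)]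

-- resolve A's loop outcome the way CheckBeCentence's body does
def resolveA (pos : List (String × String)) : (String ⊕ (String × Int)) → String
  | .inl s => s
  | .inr (s, c) => s ++ CheckBeCentence pos c

theorem CheckBeCentence_eq (pos : List (String × String)) (index : Int) :
    CheckBeCentence pos index = resolveA pos (loopA pos index 0 "") := by
  unfold CheckBeCentence
  rcases h : loopA pos index 0 "" with s | ⟨s, c⟩
  · simp only [goA, h, resolveA]
  · have hi := loopA_inr h
    simp only [goA, h, resolveA]
    unfold CheckBeCentence
    rw [goA_irrel pos pos.length pos.length (pos.length + 1) c (by omega) (by omega)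
      (by omega) (by omega)]

-- on nonempty tags, A's tag[0] != 'V' test agrees with B's startswith
theorem head_startswith (tag : String) (h : tag ≠ "") :
    (PySem.Str.pyGet? tag 0 = some 'V') ↔ PySem.Str.startswith tag "V" = true := by
  cases hl : tag.toList with
  | nil => exact absurd (by cases tag; simpa using hl) h
  | cons c cs =>
    have h0 : PySem.Str.pyGet? tag 0 = some c := by
      have : ((0 : Int)) = ((0 : Nat) : Int) := rfl
      rw [this, PySem.Str.pyGet?_natCast, hl]; rfl
    rw [h0]
    have hsw : PySem.Str.startswith tag "V" = true ↔ ('V' :: []) <+: tag.toList := by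
      rw [PySem.Str.startswith_eq]
      exact PySem.Chars.startswith_iff _ _
    rw [hsw, hl]
    constructor
    · rintro ⟨rfl⟩; exact ⟨cs, rfl⟩
    · rintro ⟨t, ht⟩
      cases ht; rfl

-- B's loop returns its accumulator unchanged once i is past the end
theorem loopB_out (pos : List (String × String)) (fuel i : Nat) (label : String)
    (h : pos.length ≤ i) : loopB pos fuel i label = label := by
  cases fuel with
  | zero => rfl
  | succ fuel => rw [loopB, dif_neg (by omega)]

-- the skip phase of A: while count-1 < index the loop only advances
theorem loopA_skip (d : Nat) : ∀ (pos : List (String × String)) (m n : Nat) (label : String),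
    Min.min m pos.length - n ≤ d → n ≤ Min.min m pos.length →
    loopA (pos.drop n) (↑m) (↑n) label
      = loopA (pos.drop (Min.min m pos.length)) (↑m) (↑(Min.min m pos.length)) label := by
  induction d with
  | zero =>
    intro pos m n label hd hn
    have : n = Min.min m pos.length := by omega
    subst this; rfl
  | succ d ih =>
    intro pos m n label hd hn
    by_cases he : n = Min.min m pos.length
    · subst he; rfl
    · have hnlt : n < Min.min m pos.length := by omega
      have hnp : n < pos.length := by omega
      have hnm : n < m := by omega
      rw [List.drop_eq_getElem_cons hnp]
      simp only [loopA]
      have hcond : (↑n : Int) + 1 - 1 < (↑m : Int) := by omega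
      rw [if_pos hcond]
      have : (↑n : Int) + 1 = ↑(n + 1) := by push_cast; ring
      rw [this]
      exact ih pos m (n + 1) label (by omega) (by omega)

-- B's loop over a prefixed accumulator
theorem loopB_append (d : Nat) : ∀ (pos : List (String × String)) (fuel i : Nat) (lab : String),
    pos.length - i ≤ d → pos.length ≤ fuel + i → loopB pos fuel i lab = lab ++ loopB pos fuel i "" := by
  induction d with
  | zero =>
    intro pos fuel i lab hd hf
    rw [loopB_out pos fuel i lab (by omega), loopB_out pos fuel i "" (by omega)]
    simp
  | succ d ih =>
    intro pos fuel i lab hd hf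
    by_cases hi : i < pos.length
    · obtain ⟨fuel, rfl⟩ : ∃ f, fuel = f + 1 := ⟨fuel - 1, by omega⟩
      rw [loopB, dif_pos hi]
      conv_rhs => rw [loopB, dif_pos hi]
      split_ifs
      · rw [ih pos fuel (i+1) (lab ++ "Negative") (by omega) (by omega),
          ih pos fuel (i+1) ("" ++ "Negative") (by omega) (by omega)]
        simp [String.append_assoc]
      · simp
      · rw [ih pos fuel (i+1) (lab ++ "Passive") (by omega) (by omega),
          ih pos fuel (i+1) ("" ++ "Passive") (by omega) (by omega)]
        simp [String.append_assoc]
      · exact ih pos fuel (i+1) lab (by omega) (by omega)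
      · simp
    · rw [loopB_out pos fuel i lab (by omega), loopB_out pos fuel i "" (by omega)]
      simp

-- main combined induction: the active phase of A equals B's loop, and (inside)
-- A's VBN restart equals continuing B's loop
theorem combo (d : Nat) : ∀ (pos : List (String × String)),
    (∀ p ∈ pos, p.2 ≠ "") →
    ∀ (j : Nat) (index : Int) (label : String) (fuel : Nat),
      pos.length - j ≤ d → index ≤ (j : Int) → pos.length ≤ fuel + j →
      resolveA pos (loopA (pos.drop j) index (↑j) label) = loopB pos fuel j label := by
  induction d with
  | zero =>
    intro pos _ j index label fuel hd _ _
    have hj : pos.length ≤ j := by omega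
    rw [List.drop_eq_nil_of_le hj, loopB_out pos fuel j label hj]
    simp [loopA, resolveA]
  | succ d ih =>
    intro pos hP j index label fuel hd hij hf
    by_cases hj : j < pos.length
    · obtain ⟨fuel, rfl⟩ : ∃ f, fuel = f + 1 := ⟨fuel - 1, by omega⟩
      rw [List.drop_eq_getElem_cons hj]
      simp only [loopA]
      have hne : (pos[j]).2 ≠ "" := hP _ (List.getElem_mem hj)
      have hcond : ¬ ((↑j : Int) + 1 - 1 < index) := by omega
      rw [if_neg hcond]
      have hcast : (↑j : Int) + 1 = ↑(j + 1) := by push_cast; ring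
      rw [loopB, dif_pos hj]
      by_cases h1 : (pos[j]).2 == "RB"
      · rw [if_pos h1, if_pos h1, hcast]
        exact ih pos hP (j + 1) index _ fuel (by omega) (by omega) (by omega)
      · rw [if_neg h1, if_neg h1]
        by_cases h2 : (pos[j]).2 == "VBG"
        · rw [if_pos h2, if_pos h2]; rfl
        · rw [if_neg h2, if_neg h2]
          by_cases h3 : (pos[j]).2 == "VBN"
          · rw [if_pos h3, if_pos h3]
            -- A breaks requesting CheckBeCentence pos (j+1); show it equals loopB at j+1
            simp only [resolveA]
            have htop : CheckBeCentence pos ((↑j : Int) + 1) = loopB pos fuel (j + 1) "" := by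
              rw [CheckBeCentence_eq, hcast]
              have hmin : Min.min (j + 1) pos.length = j + 1 := by omega
              have hskip := loopA_skip (Min.min (j + 1) pos.length) pos (j + 1) 0 ""
                (by omega) (by omega)
              simp only [Nat.cast_zero, List.drop_zero] at hskip
              rw [hskip, hmin]
              exact ih pos hP (j + 1) (↑(j + 1)) "" fuel (by omega) (by omega) (by omega)
            rw [htop]
            exact (loopB_append pos.length pos fuel (j + 1) (label ++ "Passive")
              (by omega) (by omega)).symm
          · rw [if_neg h3, if_neg h3]
            have hv := head_startswith (pos[j]).2 hne
            by_cases h4 : PySem.Str.pyGet? (pos[j]).2 0 ≠ some 'V'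
            · rw [if_pos h4, if_pos ((not_congr hv).mp h4)]; rfl
            · rw [if_neg h4, if_neg (not_not.mpr (hv.mp (not_not.mp h4))), hcast]
              exact ih pos hP (j + 1) index label fuel (by omega) (by omega) (by omega)
    · have hjl : pos.length ≤ j := by omega
      rw [List.drop_eq_nil_of_le hjl, loopB_out pos fuel j label hjl]
      simp [loopA, resolveA]

-- ===== VERDICT (by name: the statement is the Claim_ definition above) =====
theorem CheckBeCentence_spec : Claim_equal_CheckBeCentence := by
  intro pos index _ hP
  unfold Spec_CheckBeCentence CheckBeCentence_alt
  rw [CheckBeCentence_eq]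
  by_cases hneg : index ≤ 0
  · have hm : (max index 0).toNat = 0 := by omega
    rw [hm]
    have := combo pos.length pos hP 0 index "" pos.length (by omega) (by omega) (by omega)
    simpa using this
  · have hm : index = ((max index 0).toNat : Int) := by omega
    set m := (max index 0).toNat with hmd
    rw [hm]
    by_cases hml : m ≤ pos.length
    · have hmin : Min.min m pos.length = m := by omega
      have hskip := loopA_skip (Min.min m pos.length) pos m 0 "" (by omega) (by omega)
      simp only [Nat.cast_zero, List.drop_zero] at hskip
      rw [hskip, hmin]
      exact combo pos.length pos hP m (↑m) "" pos.length (by omega) (by omega) (by omega)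
    · have hmin : Min.min m pos.length = pos.length := by omega
      have hskip := loopA_skip (Min.min m pos.length) pos m 0 "" (by omega) (by omega)
      simp only [Nat.cast_zero, List.drop_zero] at hskip
      rw [hskip, hmin, List.drop_length, loopB_out pos pos.length m "" (by omega)]
      simp [loopA, resolveA]
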